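-- pv_equiv track=rewrite | github.com/dangcongty/fall_detection | eval.py | find_sequences
-- ===== SOURCE A (Python) =====
-- def find_sequences(arr, distance=12, length_fall=6):
--     sequences = []
--     n = len(arr)
--
--     start = None
--     zero_count = 0
--
--     for i, val in enumerate(arr):
--         if val == 1:
--             if start is None:
--                 start = i
--             zero_count = 0
--         else:
--             if start is not None:
--                 zero_count += 1
--                 if zero_count > distance:
--                     sequences.append((start, i - zero_count))
--                     start = None
--                     zero_count = 0
--
--     filter_sequences = []
--     for sequence in sequences:
--         s, e = sequence
--         if e - s > length_fall:
--             filter_sequences.append(sequence)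
--
--     # Final check if a sequence continued till the end
--     if start is not None:
--         filter_sequences.append((start, n - 1))
--
--     return filter_sequences
-- ===== SOURCE B (Python) =====
-- def find_sequences(arr, distance=12, length_fall=6):
--     # One pass over the positions of 1s instead of a stateful scan over every element.
--     n = len(arr)
--     ones = [i for i, v in enumerate(arr) if v == 1]
--     if not ones:
--         return []
--     d = max(distance, 0)
--     out = []
--     s = ones[0]
--     last = ones[0]
--     for j in ones[1:]:
--         if j - last - 1 > d:  # more than `distance` zeros between consecutive 1s
--             if last - s > length_fall:
--                 out.append((s, last))
--             s = j
--         last = j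
--     if n - 1 - last <= d:      # run still open at the end of the array
--         out.append((s, n - 1))
--     elif last - s > length_fall:
--         out.append((s, last))
--     return out
-- ===== Notes on version B (the rewrite author's own statement) =====
-- stated objective: simpler
-- what changed: Instead of A's stateful element-by-element scan (start/zero_count) followed by a separate filtering pass, B extracts the indices of 1s once and makes a single pass over those indices, splitting clusters where the zero-gap exceeds the distance and filtering by length inline.
import Mathlib
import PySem

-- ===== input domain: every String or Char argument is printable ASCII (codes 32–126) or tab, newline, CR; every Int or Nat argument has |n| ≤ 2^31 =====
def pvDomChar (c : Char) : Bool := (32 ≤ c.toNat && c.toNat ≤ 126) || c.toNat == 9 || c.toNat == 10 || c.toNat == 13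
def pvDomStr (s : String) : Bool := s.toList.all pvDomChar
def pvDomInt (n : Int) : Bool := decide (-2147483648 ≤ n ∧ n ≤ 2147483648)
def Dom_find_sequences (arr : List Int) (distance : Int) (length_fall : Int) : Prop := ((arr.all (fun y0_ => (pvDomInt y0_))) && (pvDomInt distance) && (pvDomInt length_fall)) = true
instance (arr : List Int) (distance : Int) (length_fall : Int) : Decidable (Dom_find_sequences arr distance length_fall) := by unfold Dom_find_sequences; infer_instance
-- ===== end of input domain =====

-- B replaces A's element-by-element stateful scan (start/zero_count over every value) by one pass
-- over the positions of 1s, grouping them by gap and filtering inline (objective: simpler).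

-- ===== PORT A =====
-- the for-loop of A: state (start, zero_count); emits a closed sequence when zero_count exceeds distance
def fsLoopA (distance : Int) : List Int → Int → Option Int → Int → List (Int × Int) × Option Int
  | [], _, st, _ => ([], st)
  | v :: t, i, st, z =>
    if v = 1 then
      match st with
      | none => fsLoopA distance t (i + 1) (some i) 0
      | some s => fsLoopA distance t (i + 1) (some s) 0
    else
      match st with
      | none => fsLoopA distance t (i + 1) none z
      | some s =>
        if z + 1 > distance then
          let r := fsLoopA distance t (i + 1) none 0
          ((s, i - (z + 1)) :: r.1, r.2)
        else fsLoopA distance t (i + 1) (some s) (z + 1)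

def find_sequences (arr : List Int) (distance : Int) (length_fall : Int) : List (Int × Int) :=
  let n : Int := arr.length
  let r := fsLoopA distance arr 0 none 0
  let filter_sequences := r.1.filter (fun p => p.2 - p.1 > length_fall)
  match r.2 with
  | some s => filter_sequences ++ [(s, n - 1)]
  | none => filter_sequences

-- ===== PORT B =====
-- [i for i, v in enumerate(arr) if v == 1]
def fsOnes : List Int → Int → List Int
  | [], _ => []
  | v :: t, i => if v = 1 then i :: fsOnes t (i + 1) else fsOnes t (i + 1)

-- the for-loop of B over ones[1:], state (out, s, last), filtering inline
def fsLoopB (d length_fall : Int) : List Int → Int → Int → List (Int × Int) × Int × Int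
  | [], s, last => ([], s, last)
  | j :: rest, s, last =>
    if j - last - 1 > d then
      let r := fsLoopB d length_fall rest j j
      (if last - s > length_fall then (s, last) :: r.1 else r.1, r.2)
    else fsLoopB d length_fall rest s j

def find_sequences_alt (arr : List Int) (distance : Int) (length_fall : Int) : List (Int × Int) :=
  let n : Int := arr.length
  match fsOnes arr 0 with
  | [] => []
  | o :: os =>
    let d := max distance 0
    let r := fsLoopB d length_fall os o o
    let s := r.2.1
    let last := r.2.2
    r.1 ++ (if n - 1 - last ≤ d then [(s, n - 1)]
            else if last - s > length_fall then [(s, last)] else [])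

-- ===== PRECONDITION & SPEC =====
def Spec_find_sequences (arr : List Int) (distance : Int) (length_fall : Int) (out : List (Int × Int)) : Prop := out = find_sequences_alt arr distance length_fall
instance (arr : List Int) (distance : Int) (length_fall : Int) (out : List (Int × Int)) : Decidable (Spec_find_sequences arr distance length_fall out) := by unfold Spec_find_sequences; infer_instance

-- ===== CLAIM (what is proved, stated in full; the proofs are below) =====
def Claim_equal_find_sequences : Prop := ∀ (arr : List Int) (distance : Int) (length_fall : Int), Dom_find_sequences arr distance length_fall → Spec_find_sequences arr distance length_fall (find_sequences arr distance length_fall)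

-- ===== LEMMAS AND PROOFS =====


-- A's final output from a loop state, parameterised by the exclusive end index nEnd
def fsFinishA (length_fall nEnd : Int) (p : List (Int × Int) × Option Int) : List (Int × Int) :=
  (p.1.filter (fun q => q.2 - q.1 > length_fall)) ++
    (match p.2 with
     | some s => [(s, nEnd - 1)]
     | none => [])

-- B's final output from the suffix t starting at index i, with no pending run
def fsFinishBNone (distance length_fall : Int) (t : List Int) (i nEnd : Int) : List (Int × Int) :=
  match fsOnes t i with
  | [] => []
  | o :: os =>
    let d := max distance 0
    let r := fsLoopB d length_fall os o o
    r.1 ++ (if nEnd - 1 - r.2.2 ≤ d then [(r.2.1, nEnd - 1)]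
            else if r.2.2 - r.2.1 > length_fall then [(r.2.1, r.2.2)] else [])

-- B's final output with a pending run (s, last)
def fsFinishBSome (distance length_fall : Int) (t : List Int) (i s last nEnd : Int) : List (Int × Int) :=
  let d := max distance 0
  let r := fsLoopB d length_fall (fsOnes t i) s last
  r.1 ++ (if nEnd - 1 - r.2.2 ≤ d then [(r.2.1, nEnd - 1)]
          else if r.2.2 - r.2.1 > length_fall then [(r.2.1, r.2.2)] else [])

lemma fsOnes_head_ge : ∀ (t : List Int) (i o : Int) (rest : List Int), fsOnes t i = o :: rest → i ≤ o := by
  intro t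
  induction t with
  | nil => intro i o rest h; simp [fsOnes] at h
  | cons v t ih =>
    intro i o rest h
    by_cases hv : v = 1
    · simp [fsOnes, hv] at h
      omega
    · simp [fsOnes, hv] at h
      have := ih (i + 1) o rest h
      omega

lemma fsLoopB_cons_cont (d length_fall j s last : Int) (rest : List Int)
    (h : ¬ (j - last - 1 > d)) :
    fsLoopB d length_fall (j :: rest) s last = fsLoopB d length_fall rest s j := by
  simp only [fsLoopB]; rw [if_neg h]

lemma fsLoopB_cons_split (d length_fall j s last : Int) (rest : List Int)
    (h : j - last - 1 > d) :
    fsLoopB d length_fall (j :: rest) s last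
      = (if last - s > length_fall then (s, last) :: (fsLoopB d length_fall rest j j).1
         else (fsLoopB d length_fall rest j j).1, (fsLoopB d length_fall rest j j).2) := by
  simp only [fsLoopB]; rw [if_pos h]

lemma fsFinishA_cons (length_fall nEnd : Int) (x : Int × Int)
    (l : List (Int × Int)) (st : Option Int) :
    fsFinishA length_fall nEnd (x :: l, st)
      = if x.2 - x.1 > length_fall then x :: fsFinishA length_fall nEnd (l, st)
        else fsFinishA length_fall nEnd (l, st) := by
  by_cases h : x.2 - x.1 > length_fall <;> simp [fsFinishA, h]

lemma fs_main (distance length_fall : Int) :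
    ∀ (t : List Int) (i nEnd : Int), nEnd = i + t.length →
      (fsFinishA length_fall nEnd (fsLoopA distance t i none 0)
        = fsFinishBNone distance length_fall t i nEnd)
      ∧ (∀ s z, 0 ≤ z → z ≤ max distance 0 →
          fsFinishA length_fall nEnd (fsLoopA distance t i (some s) z)
            = fsFinishBSome distance length_fall t i s (i - z - 1) nEnd) := by
  intro t
  induction t with
  | nil =>
    intro i nEnd hn
    constructor
    · simp [fsLoopA, fsFinishA, fsFinishBNone, fsOnes]
    · intro s z hz0 hzd
      simp only [List.length_nil, Nat.cast_zero, add_zero] at hn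
      subst hn
      simp only [fsLoopA, fsFinishA, fsFinishBSome, fsOnes, fsLoopB,
        List.filter_nil, List.nil_append]
      rw [if_pos (by omega)]
  | cons v t ih =>
    intro i nEnd hn
    have hn' : nEnd = (i + 1) + (t.length : Int) := by
      simp at hn; omega
    by_cases hv : v = 1
    · -- head is a 1
      have hidx : (i : Int) + 1 - 0 - 1 = i := by ring
      constructor
      · rw [show fsLoopA distance (v :: t) i none 0
              = fsLoopA distance t (i + 1) (some i) 0 by simp [fsLoopA, hv]]
        rw [(ih (i + 1) nEnd hn').2 i 0 (by omega) (by omega), hidx]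
        simp only [fsFinishBNone, fsFinishBSome, fsOnes, hv, if_true]
      · intro s z hz0 hzd
        rw [show fsLoopA distance (v :: t) i (some s) z
              = fsLoopA distance t (i + 1) (some s) 0 by simp [fsLoopA, hv]]
        rw [(ih (i + 1) nEnd hn').2 s 0 (by omega) (by omega), hidx]
        simp only [fsFinishBSome, fsOnes, hv, if_true]
        rw [fsLoopB_cons_cont (max distance 0) length_fall i s (i - z - 1)
          (fsOnes t (i + 1)) (by omega)]
    · -- head is not a 1
      constructor
      · rw [show fsLoopA distance (v :: t) i none 0
              = fsLoopA distance t (i + 1) none 0 by simp [fsLoopA, hv]]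
        rw [(ih (i + 1) nEnd hn').1]
        simp [fsFinishBNone, fsOnes, hv]
      · intro s z hz0 hzd
        by_cases hc : z + 1 > distance
        · -- the run is closed at this zero
          have hml : i - (z + 1) = i - z - 1 := by ring
          rw [show fsLoopA distance (v :: t) i (some s) z
                = ((s, i - (z + 1)) :: (fsLoopA distance t (i + 1) none 0).1,
                   (fsLoopA distance t (i + 1) none 0).2) by
              simp [fsLoopA, hv, hc]]
          rw [hml, fsFinishA_cons,
            show ((fsLoopA distance t (i + 1) none 0).1,
                  (fsLoopA distance t (i + 1) none 0).2)
              = fsLoopA distance t (i + 1) none 0 from rfl]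
          rw [(ih (i + 1) nEnd hn').1]
          cases ho : fsOnes t (i + 1) with
          | nil =>
            simp only [fsFinishBNone, fsFinishBSome, fsOnes, hv, if_false, ho, fsLoopB]
            rw [if_neg (show ¬ (nEnd - 1 - (i - z - 1) ≤ max distance 0) by omega)]
            by_cases hls : (i - z - 1) - s > length_fall <;> simp [hls]
          | cons o rest =>
            have hoge : (i : Int) + 1 ≤ o := fsOnes_head_ge t (i + 1) o rest ho
            simp only [fsFinishBNone, fsFinishBSome, fsOnes, hv, if_false, ho]
            rw [fsLoopB_cons_split (max distance 0) length_fall o s (i - z - 1) rest (by omega)]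
            by_cases hls : (i - z - 1) - s > length_fall <;> simp [hls]
        · -- the run stays open through this zero
          rw [show fsLoopA distance (v :: t) i (some s) z
                = fsLoopA distance t (i + 1) (some s) (z + 1) by simp [fsLoopA, hv, hc]]
          rw [(ih (i + 1) nEnd hn').2 s (z + 1) (by omega) (by omega)]
          rw [show (i : Int) + 1 - (z + 1) - 1 = i - z - 1 by ring]
          simp only [fsFinishBSome, fsOnes, hv, if_false]

lemma fs_A_eq (arr : List Int) (distance length_fall : Int) :
    find_sequences arr distance length_fall
      = fsFinishA length_fall (arr.length : Int) (fsLoopA distance arr 0 none 0) := by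
  unfold find_sequences fsFinishA
  cases h : (fsLoopA distance arr 0 none 0).2 <;> simp [h]

lemma fs_B_eq (arr : List Int) (distance length_fall : Int) :
    find_sequences_alt arr distance length_fall
      = fsFinishBNone distance length_fall arr 0 (arr.length : Int) := by
  unfold find_sequences_alt fsFinishBNone
  cases h : fsOnes arr 0 <;> simp

theorem fs_equal (arr : List Int) (distance length_fall : Int) :
    find_sequences arr distance length_fall = find_sequences_alt arr distance length_fall := by
  rw [fs_A_eq, fs_B_eq]
  exact ((fs_main distance length_fall arr 0 (arr.length : Int)) (by simp)).1

-- ===== VERDICT (by name: the statement is the Claim_ definition above) =====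
theorem find_sequences_spec : Claim_equal_find_sequences := by
  intro arr distance length_fall _
  exact fs_equal arr distance length_fall
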